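-- pv_equiv track=rewrite | github.com/troymcanally/Assessment1 | Number_Converter/mcata002_converter.py | validate_binary
-- ===== SOURCE A (Python) =====
-- def validate_binary(user_input):
--     index = 0
--     is_valid = False
--
--     while index < len(user_input):
--         if user_input[index] != "0" and user_input[index] != "1":
--             is_valid = False
--             return is_valid
--         else:
--             is_valid = True
--             index += 1
--
--     return is_valid
-- ===== SOURCE B (Python) =====
-- def validate_binary(user_input):
--     n = len(user_input)
--     return n > 0 and user_input.count("0") + user_input.count("1") == n
-- ===== Notes on version B (the rewrite author's own statement) =====
-- stated objective: alternative
-- what changed: Replaces the indexed while-loop with a flag and early return by an arithmetic check: the string is valid iff it is non-empty and the counts of the two binary digit characters (via two str.count passes) sum to its length.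
import Mathlib
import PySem

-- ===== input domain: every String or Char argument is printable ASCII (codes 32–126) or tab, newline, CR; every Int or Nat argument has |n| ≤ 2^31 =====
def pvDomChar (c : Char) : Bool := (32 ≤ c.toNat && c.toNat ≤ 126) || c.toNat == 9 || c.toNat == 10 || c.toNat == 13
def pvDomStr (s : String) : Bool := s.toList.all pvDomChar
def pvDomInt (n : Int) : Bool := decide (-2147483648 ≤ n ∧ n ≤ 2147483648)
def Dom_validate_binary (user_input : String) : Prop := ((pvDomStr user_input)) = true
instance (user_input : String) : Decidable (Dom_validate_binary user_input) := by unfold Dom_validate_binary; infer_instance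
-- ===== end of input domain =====

-- B replaces A's indexed while-loop with flag and early return by an arithmetic check:
-- non-empty, and count('0') + count('1') equals the length (alternative decomposition).

-- ===== PORT A =====
-- while index < len(user_input): early-return False on a non-binary char, else set flag True
def validate_binary_go (cs : List Char) (is_valid : Bool) : Bool :=
  match cs with
  | [] => is_valid
  | c :: rest =>
      if c ≠ '0' ∧ c ≠ '1' then false
      else validate_binary_go rest true

def validate_binary (user_input : String) : Bool :=
  validate_binary_go user_input.toList false

-- ===== PORT B =====
-- n = len(user_input); return n > 0 and user_input.count("0") + user_input.count("1") == n
def validate_binary_alt (user_input : String) : Bool :=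
  let n := PySem.Str.len user_input
  decide (0 < n) &&
    decide ((PySem.Str.count user_input "0" : Int) + (PySem.Str.count user_input "1" : Int) = n)

-- ===== PRECONDITION & SPEC =====
def Spec_validate_binary (user_input : String) (out : Bool) : Prop := out = validate_binary_alt user_input
instance (user_input : String) (out : Bool) : Decidable (Spec_validate_binary user_input out) := by unfold Spec_validate_binary; infer_instance

-- ===== CLAIM =====
def Claim_equal_validate_binary : Prop := ∀ (user_input : String), Dom_validate_binary user_input → Spec_validate_binary user_input (validate_binary user_input)

-- ===== LEMMAS AND PROOFS =====
theorem go_true (cs : List Char) :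
    validate_binary_go cs true = cs.all (fun c => c = '0' ∨ c = '1') := by
  induction cs with
  | nil => rfl
  | cons c rest ih =>
    by_cases hc : c ≠ '0' ∧ c ≠ '1'
    · simp only [validate_binary_go, if_pos hc, List.all_cons]
      obtain ⟨h0, h1⟩ := hc
      simp [h0, h1]
    · simp only [validate_binary_go, if_neg hc, ih, List.all_cons]
      rw [not_and_or, not_not, not_not] at hc
      rcases hc with h | h <;> simp [h]

-- count.go with a single-character needle is List.count (fuel ≥ remaining length)
theorem count_go_singleton (c : Char) (fuel : Nat) (l : List Char) (acc : Nat)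
    (h : l.length ≤ fuel) :
    PySem.Chars.count.go [c] fuel l acc = acc + l.count c := by
  induction fuel generalizing l acc with
  | zero =>
    have : l = [] := List.eq_nil_of_length_eq_zero (Nat.le_zero.mp h)
    subst this; rfl
  | succ n ih =>
    cases l with
    | nil => rfl
    | cons x t =>
      have hlen : t.length ≤ n := by simpa using h
      by_cases hx : c = x
      · subst hx
        have : ([c].isPrefixOf (c :: t)) = true := by simp [List.isPrefixOf]
        simp only [PySem.Chars.count.go, this, if_pos]
        simp only [List.length_cons, List.length_nil, Nat.zero_add, List.drop_one,
          List.tail_cons]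
        rw [ih t (acc + 1) hlen]
        simp [List.count_cons]
        omega
      · have : ([c].isPrefixOf (x :: t)) = false := by
          simp [List.isPrefixOf]
          intro h'
          exact absurd h' hx
        simp only [PySem.Chars.count.go, this]
        simp only [Bool.false_eq_true, if_false]
        rw [ih t acc hlen]
        simp [List.count_cons, Ne.symm hx]

theorem str_count_char (s : String) (c : Char) (sub : String)
    (hsub : sub.toList = [c]) :
    PySem.Str.count s sub = s.toList.count c := by
  rw [PySem.Str.count_eq, hsub]
  unfold PySem.Chars.count
  simp only [List.isEmpty_cons, Bool.false_eq_true, if_false]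
  simpa using count_go_singleton c s.toList.length s.toList 0 (le_refl _)

theorem count01 (l : List Char) :
    l.count '0' + l.count '1' = l.countP (fun c => c == '0' || c == '1') := by
  induction l with
  | nil => rfl
  | cons x t ih =>
    by_cases h0 : x = '0' <;> by_cases h1 : x = '1' <;>
      simp [List.count_cons, List.countP_cons, h0, h1, ih] <;> omega

theorem count_sum_eq_length_iff (l : List Char) :
    l.count '0' + l.count '1' = l.length ↔ ∀ c ∈ l, c = '0' ∨ c = '1' := by
  rw [count01, List.countP_eq_length]
  simp

theorem go_eq_all (l : List Char) :
    validate_binary_go l false =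
      (decide (0 < l.length) && l.all (fun c => decide (c = '0' ∨ c = '1'))) := by
  cases l with
  | nil => rfl
  | cons c rest =>
    by_cases hc : c ≠ '0' ∧ c ≠ '1'
    · simp only [validate_binary_go, if_pos hc, List.all_cons]
      obtain ⟨h0, h1⟩ := hc
      simp [h0, h1]
    · simp only [validate_binary_go, if_neg hc, go_true, List.all_cons]
      rw [not_and_or, not_not, not_not] at hc
      rcases hc with h | h <;> simp [h]

-- ===== VERDICT =====
theorem validate_binary_spec : Claim_equal_validate_binary := by
  intro s _
  unfold Spec_validate_binary validate_binary validate_binary_alt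
  have h0 : PySem.Str.count s "0" = s.toList.count '0' :=
    str_count_char s '0' "0" rfl
  have h1 : PySem.Str.count s "1" = s.toList.count '1' :=
    str_count_char s '1' "1" rfl
  have hlen : PySem.Str.len s = (s.toList.length : Int) := by
    simp [PySem.Str.len_eq, PySem.Chars.len]
  rw [go_eq_all]
  simp only [h0, h1, hlen]
  have hkey : ((s.toList.count '0' : Int) + (s.toList.count '1' : Int) = (s.toList.length : Int))
      ↔ (∀ c ∈ s.toList, c = '0' ∨ c = '1') := by
    rw [← count_sum_eq_length_iff]
    exact_mod_cast Iff.rfl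
  have hpos : ((0 : Int) < (s.toList.length : Int)) ↔ 0 < s.toList.length := by
    exact_mod_cast Iff.rfl
  rw [Bool.eq_iff_iff]
  simp only [Bool.and_eq_true, decide_eq_true_eq, List.all_eq_true, hkey, hpos]
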